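-- pv_equiv track=rewrite | github.com/M-Abrisham/Na0S | tests/test_whitespace_stego.py | _build_binary_ws_text
-- ===== SOURCE A (Python) =====
-- def _build_binary_ws_text(payload, visible_prefix="Line"):
--     """Build text with simple binary (space=0, tab=1) encoded payload."""
--     bits = []
--     for ch in payload:
--         byte_val = ord(ch)
--         for shift in range(7, -1, -1):
--             bits.append((byte_val >> shift) & 1)
--
--     # Distribute bits across lines (8 bits per line = 1 char per line)
--     lines = []
--     for i in range(0, len(bits), 8):
--         chunk = bits[i:i + 8]
--         trailing = "".join("\t" if b else " " for b in chunk)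
--         lines.append("{} {}".format(visible_prefix, i // 8) + trailing)
--     return "\n".join(lines)
-- ===== SOURCE B (Python) =====
-- def _build_binary_ws_text(payload, visible_prefix="Line"):
--     """Build text with simple binary (space=0, tab=1) encoded payload.
--
--     Single pass over the payload: each character directly yields one line;
--     its 8-char whitespace suffix is built back-to-front from the low bits.
--     """
--     out = []
--     for idx, ch in enumerate(payload):
--         b = ord(ch) & 0xFF
--         suffix = ""
--         for _ in range(8):
--             suffix = ("\t" if b & 1 else " ") + suffix
--             b >>= 1
--         out.append("{} {}{}".format(visible_prefix, idx, suffix))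
--     return "\n".join(out)
-- ===== Notes on version B (the rewrite author's own statement) =====
-- stated objective: simpler
-- what changed: Replaces A's two-phase pipeline (flatten all bits into one list, then re-chunk it by slices of 8 with i//8 labels) by a single enumerate pass in which each character directly produces its line, the whitespace suffix built back-to-front from the low bits by repeated shift.
import Mathlib
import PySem

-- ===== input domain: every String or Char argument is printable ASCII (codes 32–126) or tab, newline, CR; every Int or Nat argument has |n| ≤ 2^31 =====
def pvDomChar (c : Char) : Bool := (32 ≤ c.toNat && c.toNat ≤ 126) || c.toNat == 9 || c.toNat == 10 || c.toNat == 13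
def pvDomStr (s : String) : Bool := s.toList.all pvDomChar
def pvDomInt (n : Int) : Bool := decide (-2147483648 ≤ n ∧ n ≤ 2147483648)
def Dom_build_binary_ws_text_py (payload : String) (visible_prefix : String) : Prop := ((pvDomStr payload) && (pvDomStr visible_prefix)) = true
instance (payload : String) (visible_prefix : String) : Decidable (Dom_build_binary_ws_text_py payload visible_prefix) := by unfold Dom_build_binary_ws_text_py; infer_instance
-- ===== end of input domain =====

-- B replaces A's two-phase pipeline (flatten all bits, then re-chunk by 8) with a single
-- enumerate pass building each line's suffix back-to-front from the low bits (objective: simpler).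

-- ===== PORT A =====
-- bits accumulation loop of A (lines are built over List Char; "\n".join is PySem.Chars.join)
def bbwBitsA (payload : List Char) : List Int :=
  payload.foldl (fun bits ch =>
    (PySem.List.pyRange 7 (-1) (-1)).foldl (fun bits shift =>
      bits ++ [PySem.Int.band ((ch.toNat : Int) >>> shift.toNat) 1]) bits) []

def build_binary_ws_text_py (payload : String) (visible_prefix : String) : String :=
  let bits := bbwBitsA payload.toList
  let lines : List (List Char) :=
    (PySem.List.pyRange 0 (bits.length : Int) 8).foldl (fun lines i =>
      let chunk := PySem.List.slice bits (some i) (some (i + 8))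
      let trailing := PySem.Chars.join [] (chunk.map (fun b => if b ≠ 0 then ['\t'] else [' ']))
      lines ++ [visible_prefix.toList ++ [' '] ++ PySem.Int.toChars (PySem.Int.floordiv i 8) ++ trailing]) []
  String.ofList (PySem.Chars.join ['\n'] lines)

-- ===== PORT B =====
def build_binary_ws_text_py_alt (payload : String) (visible_prefix : String) : String :=
  let out : List (List Char) :=
    (PySem.List.enumerate payload.toList 0).foldl (fun out p =>
      let b := PySem.Int.band ((p.2.toNat : Int)) 255
      let sb := (List.range 8).foldl (fun (sb : List Char × Int) _ =>
        ((if PySem.Int.band sb.2 1 ≠ 0 then '\t' else ' ') :: sb.1, sb.2 >>> (1:Nat))) (([] : List Char), b)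
      out ++ [visible_prefix.toList ++ [' '] ++ PySem.Int.toChars p.1 ++ sb.1]) []
  String.ofList (PySem.Chars.join ['\n'] out)

-- ===== PRECONDITION & SPEC =====
def Spec_build_binary_ws_text_py (payload : String) (visible_prefix : String) (out : String) : Prop := out = build_binary_ws_text_py_alt payload visible_prefix
instance (payload : String) (visible_prefix : String) (out : String) : Decidable (Spec_build_binary_ws_text_py payload visible_prefix out) := by unfold Spec_build_binary_ws_text_py; infer_instance

-- ===== CLAIM (what is proved, stated in full; the proofs are below) =====
def Claim_equal_build_binary_ws_text_py : Prop := ∀ (payload : String) (visible_prefix : String), Dom_build_binary_ws_text_py payload visible_prefix → Spec_build_binary_ws_text_py payload visible_prefix (build_binary_ws_text_py payload visible_prefix)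

-- ===== LEMMAS AND PROOFS =====

-- the 8 bits one character contributes, MSB first (A's inner loop, literalised)
def bbwByte (c : Char) : List Int :=
  [PySem.Int.band ((c.toNat : Int) >>> (7:Nat)) 1, PySem.Int.band ((c.toNat : Int) >>> (6:Nat)) 1,
   PySem.Int.band ((c.toNat : Int) >>> (5:Nat)) 1, PySem.Int.band ((c.toNat : Int) >>> (4:Nat)) 1,
   PySem.Int.band ((c.toNat : Int) >>> (3:Nat)) 1, PySem.Int.band ((c.toNat : Int) >>> (2:Nat)) 1,
   PySem.Int.band ((c.toNat : Int) >>> (1:Nat)) 1, PySem.Int.band ((c.toNat : Int) >>> (0:Nat)) 1]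

-- the common normal form of line k
def bbwLine (vp cs : List Char) (k : Nat) : List Char :=
  vp ++ [' '] ++ PySem.Int.toChars (k : Int) ++
    (bbwByte (PySem.List.pyGetD cs (k : Int) ' ')).map (fun b => if b ≠ 0 then '\t' else ' ')

lemma bbwBitsA_eq (cs : List Char) : bbwBitsA cs = cs.flatMap bbwByte := by
  unfold bbwBitsA
  simp only [PySem.List.foldl_append_singleton_eq_map, PySem.List.foldl_append_eq_flatMap,
    List.nil_append]
  congr 1

lemma bbwByte_length (c : Char) : (bbwByte c).length = 8 := rfl

lemma bbw_flat_length (cs : List Char) : (cs.flatMap bbwByte).length = 8 * cs.length := by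
  induction cs with
  | nil => rfl
  | cons c cs ih => simp [List.flatMap_cons, ih, bbwByte_length]; ring

lemma bbw_drop (k : Nat) (cs : List Char) :
    (cs.flatMap bbwByte).drop (8 * k) = (cs.drop k).flatMap bbwByte := by
  induction k generalizing cs with
  | zero => simp
  | succ k ih =>
    cases cs with
    | nil => simp
    | cons c cs =>
      rw [List.flatMap_cons, show 8 * (k + 1) = 8 + 8 * k by ring, ← List.drop_drop,
        List.drop_left' (bbwByte_length c), List.drop_succ_cons, ih]

lemma bbw_join (l : List Int) :
    PySem.Chars.join [] (l.map (fun b => if b ≠ 0 then ['\t'] else [' '])) =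
      l.map (fun b => if b ≠ 0 then '\t' else ' ') := by
  have h : (fun b : Int => if b ≠ 0 then ['\t'] else [' ']) =
      (fun c => [c]) ∘ (fun b : Int => if b ≠ 0 then '\t' else ' ') := by
    funext b; by_cases hb : b ≠ 0 <;> simp [hb]
  rw [h, ← List.map_map, PySem.Chars.join_nil_singletons]

lemma bbw_getD (cs : List Char) (k : Nat) (hk : k < cs.length) :
    PySem.List.pyGetD cs (k : Int) ' ' = cs[k] := by
  rw [PySem.List.pyGetD_natCast, List.getD_eq_getElem cs ' ' hk]

-- A's line loop produces the normal form
lemma linesA_eq (vp cs : List Char) :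
    (PySem.List.pyRange 0 ((cs.flatMap bbwByte).length : Int) 8).foldl (fun lines i =>
      lines ++ [vp ++ [' '] ++ PySem.Int.toChars (PySem.Int.floordiv i 8) ++
        PySem.Chars.join [] ((PySem.List.slice (cs.flatMap bbwByte) (some i) (some (i + 8))).map
          (fun b => if b ≠ 0 then ['\t'] else [' ']))]) [] =
      (List.range cs.length).map (bbwLine vp cs) := by
  rw [PySem.List.foldl_append_singleton_eq_map, List.nil_append, bbw_flat_length]
  have hrange : PySem.List.pyRange 0 ((8 * cs.length : Nat) : Int) 8 =
      (List.range cs.length).map (fun k => ((8 * k : Nat) : Int)) := by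
    rw [PySem.List.pyRange_of_pos 0 ((8 * cs.length : Nat) : Int) (by norm_num)]
    have hc : (if (0 : Int) < ((8 * cs.length : Nat) : Int)
        then ((((8 * cs.length : Nat) : Int) - 0 + 8 - 1) / 8).toNat else 0) = cs.length := by
      split_ifs with h
      · have h2 : (((8 * cs.length : Nat) : Int) - 0 + 8 - 1) = ((8 * cs.length + 7 : Nat) : Int) := by
          push_cast; ring
        rw [h2, show (8 : Int) = ((8 : Nat) : Int) from rfl, ← Int.natCast_ediv]
        omega
      · omega
    rw [hc]
    apply List.map_congr_left
    intro k _
    push_cast; ring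
  rw [hrange, List.map_map]
  apply List.map_congr_left
  intro k hk
  rw [List.mem_range] at hk
  have hdiv : PySem.Int.floordiv ((8 * k : Nat) : Int) 8 = (k : Int) := by
    rw [show (8 : Int) = ((8 : Nat) : Int) from rfl, PySem.Int.floordiv_natCast]
    omega
  have hslice : PySem.List.slice (cs.flatMap bbwByte) (some ((8 * k : Nat) : Int))
      (some (((8 * k : Nat) : Int) + 8)) = bbwByte cs[k] := by
    have hb : (((8 * k : Nat) : Int) + 8) = ((8 * k + 8 : Nat) : Int) := by push_cast; ring
    rw [hb, PySem.List.slice_natCast, bbw_drop, List.drop_eq_getElem_cons hk,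
      List.flatMap_cons, show 8 * k + 8 - 8 * k = 8 by omega, List.take_left' (bbwByte_length _)]
  rw [Function.comp, hdiv, hslice, bbw_join, bbwLine, bbw_getD cs k hk]

-- B's inner 8-iteration loop, closed
lemma bbw_inner (b : Int) :
    ((List.range 8).foldl (fun (sb : List Char × Int) _ =>
      ((if PySem.Int.band sb.2 1 ≠ 0 then '\t' else ' ') :: sb.1, sb.2 >>> (1:Nat))) (([] : List Char), b)).1 =
      [if PySem.Int.band (b >>> (7:Nat)) 1 ≠ 0 then '\t' else ' ',
       if PySem.Int.band (b >>> (6:Nat)) 1 ≠ 0 then '\t' else ' ',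
       if PySem.Int.band (b >>> (5:ℕ)) 1 ≠ 0 then '\t' else ' ',
       if PySem.Int.band (b >>> (4:ℕ)) 1 ≠ 0 then '\t' else ' ',
       if PySem.Int.band (b >>> (3:ℕ)) 1 ≠ 0 then '\t' else ' ',
       if PySem.Int.band (b >>> (2:ℕ)) 1 ≠ 0 then '\t' else ' ',
       if PySem.Int.band (b >>> (1:ℕ)) 1 ≠ 0 then '\t' else ' ',
       if PySem.Int.band (b >>> (0:ℕ)) 1 ≠ 0 then '\t' else ' '] := by
  simp only [show List.range 8 = [0, 1, 2, 3, 4, 5, 6, 7] from rfl, List.foldl]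
  simp only [← Int.shiftRight_add]
  norm_num

-- masking with 0xFF does not change bits 0..7
lemma bbw_mask (m : Nat) (s : Nat) (hs : s < 8) :
    PySem.Int.band (PySem.Int.band (m : Int) 255 >>> s) 1 =
      PySem.Int.band ((m : Int) >>> s) 1 := by
  have h255 : (255 : Int) = ((255 : Nat) : Int) := rfl
  have h1 : (1 : Int) = ((1 : Nat) : Int) := rfl
  rw [h255, h1, PySem.Int.band_natCast, ← Int.natCast_shiftRight, ← Int.natCast_shiftRight,
    PySem.Int.band_natCast, PySem.Int.band_natCast]
  congr 1
  have hm : m &&& 255 = m % 256 := by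
    have h8 := Nat.and_two_pow_sub_one_eq_mod m 8
    norm_num at h8
    exact h8
  rw [hm, Nat.and_one_is_mod, Nat.and_one_is_mod, Nat.shiftRight_eq_div_pow,
    Nat.shiftRight_eq_div_pow]
  interval_cases s <;> omega

-- B's loop produces the same normal form
lemma linesB_eq (vp cs : List Char) :
    (PySem.List.enumerate cs 0).foldl (fun out p =>
      out ++ [vp ++ [' '] ++ PySem.Int.toChars p.1 ++
        ((List.range 8).foldl (fun (sb : List Char × Int) _ =>
          ((if PySem.Int.band sb.2 1 ≠ 0 then '\t' else ' ') :: sb.1, sb.2 >>> (1:Nat)))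
          (([] : List Char), PySem.Int.band ((p.2.toNat : Int)) 255)).1]) [] =
      (List.range cs.length).map (bbwLine vp cs) := by
  rw [PySem.List.foldl_append_singleton_eq_map, List.nil_append,
    PySem.List.enumerate_eq_map_pyRange cs ' ', PySem.List.len,
    PySem.List.pyRange_zero_natCast, List.map_map, List.map_map]
  apply List.map_congr_left
  intro k _
  have h := bbw_mask (PySem.List.pyGetD cs (k : Int) ' ').toNat
  simp only [Function.comp, bbw_inner, bbwLine, bbwByte,
    h 7 (by omega), h 6 (by omega), h 5 (by omega), h 4 (by omega), h 3 (by omega),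
    h 2 (by omega), h 1 (by omega), h 0 (by omega), List.map]

-- ===== VERDICT (by name: the statement is the Claim_ definition above) =====
theorem build_binary_ws_text_py_spec : Claim_equal_build_binary_ws_text_py := by
  intro payload visible_prefix _
  unfold Spec_build_binary_ws_text_py build_binary_ws_text_py build_binary_ws_text_py_alt
  simp only [bbwBitsA_eq]
  rw [linesA_eq, linesB_eq]
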